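-- pv_equiv track=rewrite | github.com/DooHongKm/Algorithm_Solutions | 프로그래머스/2/87390. n＾2 배열 자르기/n＾2 배열 자르기.py | solution
-- ===== SOURCE A (Python) =====
-- def solution(n, left, right):
--
--     result = []
--     l1 = left // n
--     l2 = left % n
--     r1 = right // n
--     count = right - left + 1
--
--     for i in range(l1, r1 + 1):
--         temp = [t + 1 for t in range(n)]
--         for j in range(i):
--             temp[j] = i + 1
--         result += temp
--
--     result = result[l2:l2+count]
--
--     return result
-- ===== SOURCE B (Python) =====
-- def solution(n, left, right):
--     return [max(k // n, k % n) + 1 for k in range(left, right + 1)]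
-- ===== Notes on version B (the rewrite author's own statement) =====
-- stated objective: faster
-- what changed: A materialises every full row from left//n to right//n (overwriting the first i cells of each) and then slices; B computes each requested cell directly as max(k//n, k%n)+1 for k in [left, right], touching only the answer's cells. Pre_ restricts to the natural domain n >= 1 and to inputs where A does not raise: for n <= -1 A's generated rows are all empty so it returns [] regardless of the requested range, an artefact of the row construction.
-- outside the precondition, e.g. on solution(-2, 0, 1): A returns [], B returns [1, 0]
import Mathlib
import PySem

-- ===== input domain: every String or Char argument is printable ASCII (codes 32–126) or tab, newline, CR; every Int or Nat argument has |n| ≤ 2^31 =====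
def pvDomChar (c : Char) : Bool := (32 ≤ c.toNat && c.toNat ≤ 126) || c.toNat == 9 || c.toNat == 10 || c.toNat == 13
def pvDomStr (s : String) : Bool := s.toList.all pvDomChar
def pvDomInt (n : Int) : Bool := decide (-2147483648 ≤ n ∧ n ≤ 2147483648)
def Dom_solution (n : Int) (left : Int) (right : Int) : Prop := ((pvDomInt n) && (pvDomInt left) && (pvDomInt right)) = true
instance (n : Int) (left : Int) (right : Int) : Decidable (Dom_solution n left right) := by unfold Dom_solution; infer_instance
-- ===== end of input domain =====

-- B replaces A's row-by-row construction (build every row left//n..right//n, then slice)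
-- by computing each requested cell directly as max(k//n, k%n)+1 for k in [left, right];
-- objective: faster (work proportional to the answer length, not to whole rows).

-- ===== PORT A =====
def solution (n : Int) (left : Int) (right : Int) : List Int :=
  let l1 := PySem.Int.floordiv left n
  let l2 := PySem.Int.mod left n
  let r1 := PySem.Int.floordiv right n
  let count := right - left + 1
  let result : List Int :=
    (PySem.List.pyRange l1 (r1 + 1) 1).foldl (fun result i =>
      let temp : List Int := (PySem.List.pyRange 0 n 1).map (fun t => t + 1)
      let temp := (PySem.List.pyRange 0 i 1).foldl (fun t j => PySem.List.pySetD t j (i + 1)) temp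
      result ++ temp) []
  PySem.List.slice result (some l2) (some (l2 + count))

-- ===== PORT B =====
def solution_alt (n : Int) (left : Int) (right : Int) : List Int :=
  (PySem.List.pyRange left (right + 1) 1).map
    (fun k => max (PySem.Int.floordiv k n) (PySem.Int.mod k n) + 1)

-- ===== PRECONDITION & SPEC =====
-- Pre_ restricts to the natural domain n ≥ 1 (n is the side of the n×n array) and to inputs
-- where A does not raise (A raises IndexError when right//n > n with a nonempty row range,
-- and ZeroDivisionError when n = 0); for n ≤ -1 A's rows are empty so it accidentally returns [].
def Pre_solution (n : Int) (left : Int) (right : Int) : Prop :=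
  1 ≤ n ∧ (PySem.Int.floordiv right n ≤ n ∨ PySem.Int.floordiv right n < PySem.Int.floordiv left n)
instance (n : Int) (left : Int) (right : Int) : Decidable (Pre_solution n left right) := by
  unfold Pre_solution; infer_instance

def pvWitness_solution : Int × Int × Int := (3, 2, 5)

def Spec_solution (n : Int) (left : Int) (right : Int) (out : List Int) : Prop := out = solution_alt n left right
instance (n : Int) (left : Int) (right : Int) (out : List Int) : Decidable (Spec_solution n left right out) := by unfold Spec_solution; infer_instance

-- ===== CLAIM (what is proved, stated in full; the proofs are below) =====
def Claim_equal_solution : Prop := ∀ (n : Int) (left : Int) (right : Int), Dom_solution n left right → Pre_solution n left right → Spec_solution n left right (solution n left right)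

-- ===== LEMMAS AND PROOFS =====

-- the inner loop writes v into positions 0..i-1 (all in range): it rewrites the first i entries
theorem setfold_range (v : Int) :
    ∀ (i : Nat) (xs : List Int), i ≤ xs.length →
      (List.range i).foldl (fun t j => t.set j v) xs
        = (List.replicate i v) ++ xs.drop i := by
  intro i
  induction i with
  | zero => intro xs _; simp
  | succ m ih =>
    intro xs h
    rw [List.range_succ, List.foldl_append, ih xs (by omega)]
    simp only [List.foldl_cons, List.foldl_nil]
    rw [List.set_append]
    simp only [List.length_replicate]
    have hlt : ¬ (m < m) := by omega
    simp only [if_neg hlt]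
    have hmm : m - m = 0 := by omega
    have hxs : xs.drop m = xs[m] :: xs.drop (m+1) := List.drop_eq_getElem_cons (by omega)
    rw [hmm, hxs, List.set_cons_zero, List.replicate_succ' (n := m)]
    simp

theorem drop_map_pyRange (f : Int → Int) (a b : Int) (d : Nat) (h : a + (d : Int) ≤ b) :
    ((PySem.List.pyRange a b 1).map f).drop d = (PySem.List.pyRange (a + (d : Int)) b 1).map f := by
  rw [PySem.List.pyRange_one_append a (a + (d : Int)) b (by omega) h, List.map_append]
  have hl : ((PySem.List.pyRange a (a + (d : Int)) 1).map f).length = d := by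
    simp [PySem.List.length_pyRange_one]
  have hd := List.drop_left (l₁ := (PySem.List.pyRange a (a + (d : Int)) 1).map f)
    (l₂ := (PySem.List.pyRange (a + (d : Int)) b 1).map f)
  rw [hl] at hd
  rw [hd]

theorem take_map_pyRange (f : Int → Int) (a b : Int) (c : Nat) (h : a + (c : Int) ≤ b) :
    ((PySem.List.pyRange a b 1).map f).take c = (PySem.List.pyRange a (a + (c : Int)) 1).map f := by
  rw [PySem.List.pyRange_one_append a (a + (c : Int)) b (by omega) h, List.map_append]
  have hl : ((PySem.List.pyRange a (a + (c : Int)) 1).map f).length = c := by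
    simp [PySem.List.length_pyRange_one]
  have hd := List.take_left (l₁ := (PySem.List.pyRange a (a + (c : Int)) 1).map f)
    (l₂ := (PySem.List.pyRange (a + (c : Int)) b 1).map f)
  rw [hl] at hd
  rw [hd]

-- an empty Python slice: 0 ≤ stop ≤ start gives []
theorem slice_empty_of_le {α : Type} (xs : List α) (a b : Int) (h0 : 0 ≤ b) (h : b ≤ a) :
    PySem.List.slice xs (some a) (some b) = [] := by
  rw [PySem.List.slice_toNat _ (by omega) h0, Nat.sub_eq_zero_of_le (by omega), List.take_zero]

theorem slice_nil {α : Type} (a b : Option Int) :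
    PySem.List.slice ([] : List α) a b = [] := by
  simp [PySem.List.slice]

-- one row of A: after the overwrites it is the pointwise max row (needs i ≤ n)
theorem rowA_eq (n i : Int) (hn : 1 ≤ n) (hin : i ≤ n) :
    (PySem.List.pyRange 0 i 1).foldl (fun t j => PySem.List.pySetD t j (i + 1))
        ((PySem.List.pyRange 0 n 1).map (fun t => t + 1))
      = (PySem.List.pyRange 0 n 1).map (fun t => max i t + 1) := by
  by_cases hi : i ≤ 0
  · rw [PySem.List.pyRange_one_eq_nil (a := 0) hi]
    simp only [List.foldl_nil]
    apply List.map_congr_left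
    intro t ht
    rw [PySem.List.mem_pyRange_one] at ht
    have : max i t = t := by omega
    rw [this]
  · replace hi : 0 < i := by omega
    rw [PySem.List.pyRange_one (a := 0) (b := i), List.foldl_map]
    have hfun : (fun (t : List Int) (k : Nat) => PySem.List.pySetD t ((0 : Int) + (k : Int)) (i + 1))
        = (fun (t : List Int) (k : Nat) => t.set k (i + 1)) := by
      funext t k
      rw [zero_add, PySem.List.pySetD_natCast]
    rw [hfun, setfold_range (i + 1) ((i - 0).toNat)
      ((PySem.List.pyRange 0 n 1).map (fun t => t + 1))
      (by simp only [List.length_map, PySem.List.length_pyRange_one]; omega)]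
    rw [drop_map_pyRange (fun t => t + 1) 0 n ((i - 0).toNat) (by omega)]
    have h0i : (0 : Int) + (((i - 0).toNat : Nat) : Int) = i := by omega
    rw [h0i]
    rw [PySem.List.pyRange_one_append 0 i n (by omega) (by omega), List.map_append]
    congr 1
    · symm
      rw [List.eq_replicate_iff]
      constructor
      · simp [PySem.List.length_pyRange_one]
      · intro b hb
        simp only [List.mem_map] at hb
        obtain ⟨t, ht, rfl⟩ := hb
        rw [PySem.List.mem_pyRange_one] at ht
        have : max i t = i := by omega
        rw [this]
    · apply List.map_congr_left
      intro t ht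
      rw [PySem.List.mem_pyRange_one] at ht
      have : max i t = t := by omega
      rw [this]

-- cell identity: for a*n ≤ k < (a+1)*n, k//n = a and k%n = k - a*n
theorem floordiv_mod_block (n a k : Int) (hn : 1 ≤ n) (h1 : a * n ≤ k) (h2 : k < (a + 1) * n) :
    PySem.Int.floordiv k n = a ∧ PySem.Int.mod k n = k - a * n := by
  have hd : PySem.Int.floordiv k n = a := by
    rw [PySem.Int.floordiv_eq_iff_of_pos (by omega)]
    exact ⟨h1, h2⟩
  refine ⟨hd, ?_⟩
  have := PySem.Int.floordiv_mul_add_mod k n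
  rw [hd] at this
  omega

-- concatenating the max-rows a..a+m-1 is one map over the flat indices a*n..(a+m)*n-1
theorem flat_rows (n : Int) (hn : 1 ≤ n) :
    ∀ (m : Nat) (a : Int), (a + (m : Int) - 1) ≤ n →
      ((PySem.List.pyRange a (a + (m : Int)) 1).flatMap
        (fun i => (PySem.List.pyRange 0 n 1).map (fun t => max i t + 1)))
      = (PySem.List.pyRange (a * n) ((a + (m : Int)) * n) 1).map
          (fun k => max (PySem.Int.floordiv k n) (PySem.Int.mod k n) + 1) := by
  intro m
  induction m with
  | zero =>
    intro a _
    simp only [Nat.cast_zero, add_zero]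
    rw [PySem.List.pyRange_one_eq_nil (le_refl a), PySem.List.pyRange_one_eq_nil (le_refl _)]
    simp
  | succ p ih =>
    intro a hbound
    push_cast at hbound ⊢
    have hcons : PySem.List.pyRange a (a + ((p : Int) + 1)) 1
        = a :: PySem.List.pyRange (a + 1) (a + ((p : Int) + 1)) 1 := by
      apply PySem.List.pyRange_one_cons; omega
    rw [hcons, List.flatMap_cons]
    have hrest : a + ((p : Int) + 1) = (a + 1) + (p : Int) := by ring
    rw [hrest, ih (a + 1) (by omega)]
    have hsplit : PySem.List.pyRange (a * n) (((a + 1) + (p : Int)) * n) 1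
        = PySem.List.pyRange (a * n) ((a + 1) * n) 1
          ++ PySem.List.pyRange ((a + 1) * n) (((a + 1) + (p : Int)) * n) 1 := by
      apply PySem.List.pyRange_one_append
      · nlinarith
      · nlinarith
    rw [hsplit, List.map_append]
    congr 1
    have hblock : (a + 1) * n = a * n + (n - 0) := by ring
    rw [hblock, PySem.List.pyRange_one (a := a * n) (b := a * n + (n - 0)),
        PySem.List.pyRange_one (a := 0) (b := n)]
    rw [add_sub_cancel_left]
    simp only [List.map_map]
    apply List.map_congr_left
    intro t ht
    rw [List.mem_range] at ht
    have htn : (t : Int) < n := by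
      have := Int.toNat_of_nonneg (by omega : (0:Int) ≤ n - 0)
      omega
    have hb := floordiv_mod_block n a (a * n + (t : Int)) hn (by omega) (by nlinarith)
    simp only [Function.comp_apply, hb.1, hb.2]
    have h1 : a * n + (t : Int) - a * n = (t : Int) := by ring
    rw [h1]
    have ha : a ≤ n := by omega
    omega

-- ===== VERDICT (by name: the statement is the Claim_ definition above) =====
theorem solution_spec : Claim_equal_solution := by
  intro n left right _ hpre
  obtain ⟨hn, hpre2⟩ := hpre
  unfold Spec_solution solution solution_alt
  simp only []
  have hmodl := PySem.Int.floordiv_mul_add_mod left n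
  have hmodr := PySem.Int.floordiv_mul_add_mod right n
  have hl2lb : 0 ≤ PySem.Int.mod left n := by
    rw [PySem.Int.mod_eq_emod_of_pos (by omega : (0:Int) < n)]
    exact Int.emod_nonneg left (by omega)
  have hl2ub : PySem.Int.mod left n < n := by
    rw [PySem.Int.mod_eq_emod_of_pos (by omega : (0:Int) < n)]
    exact Int.emod_lt_of_pos left (by omega)
  have hr2lb : 0 ≤ PySem.Int.mod right n := by
    rw [PySem.Int.mod_eq_emod_of_pos (by omega : (0:Int) < n)]
    exact Int.emod_nonneg right (by omega)
  have hr2ub : PySem.Int.mod right n < n := by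
    rw [PySem.Int.mod_eq_emod_of_pos (by omega : (0:Int) < n)]
    exact Int.emod_lt_of_pos right (by omega)
  rw [PySem.List.foldl_append_eq_flatMap, List.nil_append]
  by_cases hlr : left ≤ right
  · -- main case: left ≤ right
    have hl1r1 : PySem.Int.floordiv left n ≤ PySem.Int.floordiv right n := by nlinarith
    have hr1n : PySem.Int.floordiv right n ≤ n := by
      rcases hpre2 with h | h
      · exact h
      · omega
    have hrows : (PySem.List.pyRange (PySem.Int.floordiv left n) (PySem.Int.floordiv right n + 1) 1).flatMap
          (fun i =>
            (PySem.List.pyRange 0 i 1).foldl (fun t j => PySem.List.pySetD t j (i + 1))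
              ((PySem.List.pyRange 0 n 1).map (fun t => t + 1)))
        = (PySem.List.pyRange (PySem.Int.floordiv left n) (PySem.Int.floordiv right n + 1) 1).flatMap
          (fun i => (PySem.List.pyRange 0 n 1).map (fun t => max i t + 1)) := by
      apply List.flatMap_congr
      intro i hi
      rw [PySem.List.mem_pyRange_one] at hi
      exact rowA_eq n i hn (by omega)
    rw [hrows]
    have hm : PySem.Int.floordiv right n + 1
        = PySem.Int.floordiv left n
          + (((PySem.Int.floordiv right n + 1 - PySem.Int.floordiv left n).toNat : Nat) : Int) := by
      rw [Int.toNat_of_nonneg (by omega)]; ring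
    rw [hm, flat_rows n hn _ _ (by rw [Int.toNat_of_nonneg (by omega)]; omega), ← hm]
    -- the slice picks out exactly the flat indices left..right
    rw [PySem.List.slice_toNat _ hl2lb (by omega)]
    have htn : (PySem.Int.mod left n + (right - left + 1)).toNat - (PySem.Int.mod left n).toNat
        = (right - left + 1).toNat := by omega
    rw [htn]
    have hleft : PySem.Int.floordiv left n * n + (((PySem.Int.mod left n).toNat : Nat) : Int) = left := by
      omega
    rw [drop_map_pyRange _ _ _ _ (by rw [hleft]; nlinarith), hleft]
    rw [take_map_pyRange _ _ _ _ (by rw [Int.toNat_of_nonneg (by omega : (0:Int) ≤ right - left + 1)]; nlinarith)]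
    have : left + (((right - left + 1).toNat : Nat) : Int) = right + 1 := by omega
    rw [this]
  · -- empty case: right < left, both sides are []
    replace hlr : right < left := by omega
    rw [PySem.List.pyRange_one_eq_nil (by omega : right + 1 ≤ left), List.map_nil]
    by_cases hlr1 : PySem.Int.floordiv left n ≤ PySem.Int.floordiv right n
    · have hstop : 0 ≤ PySem.Int.mod left n + (right - left + 1) := by nlinarith
      rw [slice_empty_of_le _ _ _ hstop (by omega)]
    · rw [PySem.List.pyRange_one_eq_nil (by omega : PySem.Int.floordiv right n + 1 ≤ PySem.Int.floordiv left n),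
        List.flatMap_nil, slice_nil]
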